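-- pv_equiv track=rewrite | github.com/A1029384756/COMBATRPG | engine.py | textSpacing
-- ===== SOURCE A (Python) =====
-- def textSpacing(text, maxLength):
--     textLength = len(text)
--
--     for i in range(maxLength - textLength):
--         if (i % 2) != 0:
--             text = ' ' + text
--         else:
--             text = text + ' '
--     return text
-- ===== SOURCE B (Python) =====
-- def textSpacing(text, maxLength):
--     k = maxLength - len(text)
--     if k <= 0:
--         return text
--     return ' ' * (k // 2) + text + ' ' * (k - k // 2)
-- ===== Notes on version B (the rewrite author's own statement) =====
-- stated objective: simpler
-- what changed: Replaces the alternating prepend/append loop with a closed-form construction: floor(k/2) leading and ceil(k/2) trailing spaces built once with string multiplication.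
import Mathlib
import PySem

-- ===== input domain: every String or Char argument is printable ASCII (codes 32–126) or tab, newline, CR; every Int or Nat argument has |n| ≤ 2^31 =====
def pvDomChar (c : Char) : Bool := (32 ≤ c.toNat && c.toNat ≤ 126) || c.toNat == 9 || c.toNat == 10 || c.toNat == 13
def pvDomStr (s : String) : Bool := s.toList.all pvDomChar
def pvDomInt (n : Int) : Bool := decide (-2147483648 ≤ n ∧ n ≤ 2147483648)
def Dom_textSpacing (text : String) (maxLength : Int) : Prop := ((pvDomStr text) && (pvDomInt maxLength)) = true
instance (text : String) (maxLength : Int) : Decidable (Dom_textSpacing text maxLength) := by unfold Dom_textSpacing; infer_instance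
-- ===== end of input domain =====

-- B replaces A's alternating prepend/append loop by a closed-form padding: floor(k/2) leading and ceil(k/2) trailing spaces (simpler).

-- ===== PORT A =====
def textSpacing (text : String) (maxLength : Int) : String :=
  (PySem.List.pyRange 0 (maxLength - PySem.Str.len text) 1).foldl
    (fun t i => if PySem.Int.mod i 2 ≠ 0 then " " ++ t else t ++ " ") text

-- ===== PORT B =====
def textSpacing_alt (text : String) (maxLength : Int) : String :=
  let k := maxLength - PySem.Str.len text
  if k ≤ 0 then text
  else String.ofList (List.replicate (PySem.Int.floordiv k 2).toNat ' ') ++ text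
         ++ String.ofList (List.replicate (k - PySem.Int.floordiv k 2).toNat ' ')

-- ===== PRECONDITION & SPEC =====
def Spec_textSpacing (text : String) (maxLength : Int) (out : String) : Prop := out = textSpacing_alt text maxLength
instance (text : String) (maxLength : Int) (out : String) : Decidable (Spec_textSpacing text maxLength out) := by unfold Spec_textSpacing; infer_instance

-- ===== CLAIM (what is proved, stated in full; the proofs are below) =====
def Claim_equal_textSpacing : Prop := ∀ (text : String) (maxLength : Int), Dom_textSpacing text maxLength → Spec_textSpacing text maxLength (textSpacing text maxLength)

-- ===== LEMMAS AND PROOFS =====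

-- loop invariant: after processing range(0,n), the text is ⌊n/2⌋ leading spaces ++ text ++ ⌈n/2⌉ trailing spaces
theorem pv_loop (text : String) (n : Nat) :
    (PySem.List.pyRange 0 (n : Int) 1).foldl
      (fun t i => if PySem.Int.mod i 2 ≠ 0 then " " ++ t else t ++ " ") text
    = String.ofList (List.replicate (n / 2) ' ') ++ text ++ String.ofList (List.replicate ((n + 1) / 2) ' ') := by
  induction n with
  | zero =>
      rw [PySem.List.pyRange_one_eq_nil (by omega)]
      apply String.toList_inj.mp
      simp
  | succ m ih =>
      rw [show ((m + 1 : Nat) : Int) = (m : Int) + 1 by push_cast; ring,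
          PySem.List.pyRange_one_succ_right (by omega), List.foldl_append, ih]
      simp only [List.foldl_cons, List.foldl_nil]
      have hmod : PySem.Int.mod (m : Int) 2 = ((m % 2 : Nat) : Int) := by
        exact_mod_cast PySem.Int.mod_natCast m 2
      apply String.toList_inj.mp
      by_cases h : m % 2 = 0
      · have hne : ¬ (PySem.Int.mod (m : Int) 2 ≠ 0) := by rw [hmod, h]; simp
        rw [if_neg hne]
        have h1 : (m + 1) / 2 = m / 2 := by omega
        have h2 : (m + 1 + 1) / 2 = (m + 1) / 2 + 1 := by omega
        simp only [h1, h2, List.replicate_succ']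
        simp [List.append_assoc]
      · have hne : PySem.Int.mod (m : Int) 2 ≠ 0 := by rw [hmod]; omega
        rw [if_pos hne]
        have h1 : (m + 1) / 2 = m / 2 + 1 := by omega
        have h2 : (m + 1 + 1) / 2 = (m + 1) / 2 := by omega
        simp only [h1, h2, List.replicate_succ]
        simp [List.append_assoc]

-- ===== VERDICT (by name: the statement is the Claim_ definition above) =====
theorem textSpacing_spec : Claim_equal_textSpacing := by
  intro text maxLength _
  unfold Spec_textSpacing textSpacing textSpacing_alt
  by_cases h : maxLength - PySem.Str.len text ≤ 0
  · rw [if_pos h, PySem.List.pyRange_one_eq_nil (by omega)]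
    rfl
  · rw [if_neg h]
    have hn : maxLength - PySem.Str.len text = (((maxLength - PySem.Str.len text).toNat : Nat) : Int) := by omega
    set n : Nat := (maxLength - PySem.Str.len text).toNat with hdefn
    have hfd : PySem.Int.floordiv ((n : Nat) : Int) 2 = ((n : Nat) : Int) / 2 :=
      PySem.Int.floordiv_eq_ediv_of_pos (by omega)
    have c1 : (PySem.Int.floordiv ((n : Nat) : Int) 2).toNat = n / 2 := by rw [hfd]; omega
    have c2 : (((n : Nat) : Int) - PySem.Int.floordiv ((n : Nat) : Int) 2).toNat = (n + 1) / 2 := by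
      rw [hfd]; omega
    rw [hn, pv_loop, c1, c2]
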